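-- pv_equiv track=rewrite | github.com/Co1ddog/LDA | predict.py | parse_document
-- ===== SOURCE A (Python) =====
-- def parse_document(text):
--     authors = []
--     abstract = ''
--     lines = text.split('\n')
--
--     # 用于判断当前是否在读取作者列表
--     in_author_list = False
--
--     for line in lines:
--         # 开始读取作者列表
--         if line.startswith('AF '):
--             in_author_list = True
--             author = ' '.join(line.split()[1:])  # 移除 'AF ' 并合并姓名
--             authors.append(author)
--         # 作者列表以 'AF ' 开头，后续行以空格开头
--         elif in_author_list and line.startswith(' '):
--             author = ' '.join(line.strip().split())  # 移除前导空格，并合并姓名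
--             authors.append(author)
--         # 不再是作者列表部分
--         elif line and not line.startswith(' '):
--             in_author_list = False
--
--         # 摘要只在一个 'AB ' 行开始，直到遇到 'ER' 结束
--         if line.startswith('AB '):
--             abstract = line[3:]
--         elif line.startswith('ER'):
--             # 到达条目末尾，不需要再读取任何内容
--             break
--         elif abstract:
--             abstract += line.strip() + ' '
--
--     return authors, abstract.strip()
-- ===== SOURCE B (Python) =====
-- def parse_document(text):
--     # Truncate at the first 'ER' line once, then make two independent passes:
--     # one for the authors, one for the abstract.
--     head = []
--     for line in text.split('\n'):
--         if line.startswith('ER'):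
--             break
--         head.append(line)
--
--     authors = []
--     in_author_list = False
--     for line in head:
--         if line.startswith('AF '):
--             in_author_list = True
--             authors.append(' '.join(line.split()[1:]))
--         elif in_author_list and line.startswith(' '):
--             authors.append(' '.join(line.strip().split()))
--         elif line and not line.startswith(' '):
--             in_author_list = False
--
--     abstract = ''
--     for line in head:
--         if line.startswith('AB '):
--             abstract = line[3:]
--         elif abstract:
--             abstract += line.strip() + ' '
--
--     return authors, abstract.strip()
-- ===== Notes on version B (the rewrite author's own statement) =====
-- stated objective: alternative
-- what changed: A's single interleaved loop with a break and shared mutable state is replaced by truncating the line list at the first end-of-record marker line once and then making two independent single-purpose passes, one building the author list and one building the abstract.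
import Mathlib
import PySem

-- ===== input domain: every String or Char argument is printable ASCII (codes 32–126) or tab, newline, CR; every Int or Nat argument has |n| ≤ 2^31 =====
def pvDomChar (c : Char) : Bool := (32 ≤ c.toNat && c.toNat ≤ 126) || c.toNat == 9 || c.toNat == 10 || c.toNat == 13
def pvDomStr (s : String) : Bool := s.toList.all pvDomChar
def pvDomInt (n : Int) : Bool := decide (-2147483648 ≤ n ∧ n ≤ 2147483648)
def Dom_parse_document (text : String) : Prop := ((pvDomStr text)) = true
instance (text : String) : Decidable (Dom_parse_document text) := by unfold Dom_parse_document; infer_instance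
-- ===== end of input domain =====

-- B replaces A's single interleaved loop-with-break by truncating the lines at the first
-- end-of-record marker line once and then making two independent passes (authors, abstract); objective: alternative decomposition, same cost.

-- ===== PORT A =====
-- A's single for-loop with mutable (authors, abstract, in_author_list) state and a 'break' on 'ER'
def parse_document_loop : List String → List String → String → Bool → List String × String
  | [], authors, abstract, _ => (authors, abstract)
  | line :: rest, authors, abstract, inA =>
    let st : List String × Bool :=
      if PySem.Str.startswith line "AF " then
        (authors ++ [PySem.Str.join " " ((PySem.Str.split₀ line).drop 1)], true)
      else if inA && PySem.Str.startswith line " " then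
        (authors ++ [PySem.Str.join " " (PySem.Str.split₀ (PySem.Str.strip line))], inA)
      else if (line != "") && !PySem.Str.startswith line " " then
        (authors, false)
      else
        (authors, inA)
    if PySem.Str.startswith line "AB " then
      parse_document_loop rest st.1 (PySem.Str.slice line (some 3) none) st.2
    else if PySem.Str.startswith line "ER" then
      (st.1, abstract)      -- break
    else if abstract != "" then
      parse_document_loop rest st.1 (abstract ++ PySem.Str.strip line ++ " ") st.2
    else
      parse_document_loop rest st.1 abstract st.2

def parse_document (text : String) : List String × String :=
  let lines := (PySem.Str.split? text "\n").getD []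
  let r := parse_document_loop lines [] "" false
  (r.1, PySem.Str.strip r.2)

-- ===== PORT B =====
-- B's author-pass step
def pdAuthStep (st : List String × Bool) (line : String) : List String × Bool :=
  if PySem.Str.startswith line "AF " then
    (st.1 ++ [PySem.Str.join " " ((PySem.Str.split₀ line).drop 1)], true)
  else if st.2 && PySem.Str.startswith line " " then
    (st.1 ++ [PySem.Str.join " " (PySem.Str.split₀ (PySem.Str.strip line))], st.2)
  else if (line != "") && !PySem.Str.startswith line " " then
    (st.1, false)
  else
    st

-- B's abstract-pass step
def pdAbsStep (abstract line : String) : String :=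
  if PySem.Str.startswith line "AB " then PySem.Str.slice line (some 3) none
  else if abstract != "" then abstract ++ PySem.Str.strip line ++ " "
  else abstract

def parse_document_alt (text : String) : List String × String :=
  let head := ((PySem.Str.split? text "\n").getD []).takeWhile
      (fun l => !PySem.Str.startswith l "ER")
  let authors := (head.foldl pdAuthStep ([], false)).1
  let abstract := head.foldl pdAbsStep ""
  (authors, PySem.Str.strip abstract)

-- ===== PRECONDITION & SPEC =====
def Spec_parse_document (text : String) (out : List String × String) : Prop := out = parse_document_alt text
instance (text : String) (out : List String × String) : Decidable (Spec_parse_document text out) := by unfold Spec_parse_document; infer_instance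

-- ===== CLAIM (what is proved, stated in full; the proofs are below) =====
def Claim_equal_parse_document : Prop := ∀ (text : String), Dom_parse_document text → Spec_parse_document text (parse_document text)

-- ===== LEMMAS AND PROOFS =====

-- a line starting with 'ER' matches none of the author-pass tests
lemma er_facts (line : String) (h : PySem.Str.startswith line "ER" = true) :
    PySem.Str.startswith line "AF " = false ∧
    PySem.Str.startswith line " " = false ∧
    PySem.Str.startswith line "AB " = false ∧
    (line != "") = true := by
  rw [PySem.Str.startswith_eq, PySem.Chars.startswith_iff] at h
  obtain ⟨t, ht⟩ := h
  have hl : line.toList = 'E' :: 'R' :: t := by simpa using ht.symm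
  have hne : line ≠ "" := by
    intro he; rw [he] at hl; simp at hl
  refine ⟨?_, ?_, ?_, by simp [bne, hne]⟩ <;>
    · rw [PySem.Str.startswith_eq]
      apply Bool.eq_false_iff.mpr
      intro hp
      rw [PySem.Chars.startswith_iff] at hp
      obtain ⟨u, hu⟩ := hp
      rw [hl] at hu
      simp_all

lemma loop_eq (lines : List String) (authors : List String) (abstract : String) (inA : Bool) :
    parse_document_loop lines authors abstract inA =
      (((lines.takeWhile (fun l => !PySem.Str.startswith l "ER")).foldl pdAuthStep (authors, inA)).1,
       (lines.takeWhile (fun l => !PySem.Str.startswith l "ER")).foldl pdAbsStep abstract) := by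
  induction lines generalizing authors abstract inA with
  | nil => simp [parse_document_loop]
  | cons line rest ih =>
    by_cases hER : PySem.Str.startswith line "ER" = true
    · obtain ⟨hAF, hSP, hAB, hNE⟩ := er_facts line hER
      simp only [parse_document_loop, hER, hAF, hSP, hAB, hNE, List.takeWhile_cons,
        Bool.not_true, Bool.and_false, Bool.not_false, Bool.and_self, Bool.false_eq_true,
        if_false, if_true, List.foldl_nil]
    · have hER' : PySem.Str.startswith line "ER" = false := by
        simpa using hER
      have hstep : pdAuthStep (authors, inA) line =
          (if PySem.Str.startswith line "AF " then
            (authors ++ [PySem.Str.join " " ((PySem.Str.split₀ line).drop 1)], true)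
          else if inA && PySem.Str.startswith line " " then
            (authors ++ [PySem.Str.join " " (PySem.Str.split₀ (PySem.Str.strip line))], inA)
          else if (line != "") && !PySem.Str.startswith line " " then
            (authors, false)
          else (authors, inA)) := by
        simp only [pdAuthStep]
      by_cases hAB : PySem.Str.startswith line "AB " = true
      · simp only [parse_document_loop, hAB, hER', List.takeWhile_cons, Bool.not_false,
          if_true, List.foldl_cons, ih, hstep, pdAbsStep]
      · have hAB' : PySem.Str.startswith line "AB " = false := by simpa using hAB
        by_cases habs : (abstract != "") = true
        · simp only [parse_document_loop, hAB', hER', habs, List.takeWhile_cons,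
            Bool.not_false, Bool.false_eq_true, if_false, if_true, List.foldl_cons, ih,
            hstep, pdAbsStep]
        · have habs' : (abstract != "") = false := by simpa using habs
          simp only [parse_document_loop, hAB', hER', habs', List.takeWhile_cons,
            Bool.not_false, Bool.false_eq_true, if_false, if_true, List.foldl_cons, ih,
            hstep, pdAbsStep]

-- ===== VERDICT (by name: the statement is the Claim_ definition above) =====
theorem parse_document_spec : Claim_equal_parse_document := by
  intro text _
  unfold Spec_parse_document parse_document parse_document_alt
  simp only [loop_eq]
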